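-- pv_equiv track=rewrite | github.com/gwures/FireRedASR2S-cli | FireRedASR2S/fireredasr2s/fireredvad/core/vad_postprocessor.py | _extract_speech_segments
-- ===== SOURCE A (Python) =====
-- from typing import List, Tuple
--
-- def _extract_speech_segments(decisions: List[int]) -> List[Tuple[int, int]]:
--     segments = []
--     speech_start = None
--     for t, decision in enumerate(decisions):
--         if decision == 1 and speech_start is None:
--             speech_start = t
--         elif decision == 0 and speech_start is not None:
--             segments.append((speech_start, t))
--             speech_start = None
--     if speech_start is not None:
--         segments.append((speech_start, len(decisions)))
--     return segments
-- ===== SOURCE B (Python) =====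
-- from typing import List, Tuple
--
-- def _extract_speech_segments(decisions: List[int]) -> List[Tuple[int, int]]:
--     ones = [i for i, d in enumerate(decisions) if d == 1]
--     zeros = [i for i, d in enumerate(decisions) if d == 0]
--     segments = []
--     zi = 0
--     last_end = -1
--     for s in ones:
--         if s <= last_end:
--             continue
--         while zi < len(zeros) and zeros[zi] < s:
--             zi += 1
--         e = zeros[zi] if zi < len(zeros) else len(decisions)
--         segments.append((s, e))
--         last_end = e
--     return segments
-- ===== Notes on version B (the rewrite author's own statement) =====
-- stated objective: alternative
-- what changed: Replaces A's per-element nullable state machine with an index-first decomposition: collect the indices of 1s and 0s once, then merge them with a two-pointer scan (each start is the next 1 past the previous segment end, each end the next 0 past that start, or len(decisions)).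
import Mathlib
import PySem

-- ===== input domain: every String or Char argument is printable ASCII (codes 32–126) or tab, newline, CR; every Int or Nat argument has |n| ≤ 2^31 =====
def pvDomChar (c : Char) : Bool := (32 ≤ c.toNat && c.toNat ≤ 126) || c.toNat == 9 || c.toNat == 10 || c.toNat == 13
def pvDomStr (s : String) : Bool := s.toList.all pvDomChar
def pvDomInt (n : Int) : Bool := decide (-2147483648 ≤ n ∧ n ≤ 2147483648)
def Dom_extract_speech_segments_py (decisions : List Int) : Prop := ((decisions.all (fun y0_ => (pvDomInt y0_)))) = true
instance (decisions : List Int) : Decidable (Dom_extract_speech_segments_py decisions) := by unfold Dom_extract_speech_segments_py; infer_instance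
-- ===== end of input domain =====

-- B replaces A's per-element nullable state machine by collecting the indices of 1s and 0s
-- once and merging them with a two-pointer scan (objective: alternative decomposition).

-- ===== PORT A =====
-- the for-loop over enumerate(decisions): state = (segments, speech_start), t is the running index
def pyA_loop (decisions : List Int) (segments : List (Int × Int))
    (speech_start : Option Int) (t : Int) : List (Int × Int) × Option Int :=
  match decisions with
  | [] => (segments, speech_start)
  | d :: rest =>
    match speech_start with
    | none =>
      if d = 1 then pyA_loop rest segments (some t) (t + 1)
      else pyA_loop rest segments none (t + 1)
    | some s =>
      if d = 0 then pyA_loop rest (segments ++ [(s, t)]) none (t + 1)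
      else pyA_loop rest segments (some s) (t + 1)

def extract_speech_segments_py (decisions : List Int) : List (Int × Int) :=
  let p := pyA_loop decisions [] none 0
  match p.2 with
  | some s => p.1 ++ [(s, (decisions.length : Int))]
  | none => p.1

-- ===== PORT B =====
-- ones = [i for i, d in enumerate(decisions) if d == 1]
def pyB_ones : List Int → Int → List Int
  | [], _ => []
  | d :: rest, t => if d = 1 then t :: pyB_ones rest (t + 1) else pyB_ones rest (t + 1)

-- zeros = [i for i, d in enumerate(decisions) if d == 0]
def pyB_zeros : List Int → Int → List Int
  | [], _ => []
  | d :: rest, t => if d = 0 then t :: pyB_zeros rest (t + 1) else pyB_zeros rest (t + 1)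

-- the inner 'while zi < len(zeros) and zeros[zi] < s: zi += 1' (pointer = dropped prefix)
def pyB_advance : List Int → Int → List Int
  | [], _ => []
  | z :: zs, s => if z < s then pyB_advance zs s else z :: zs

-- the 'for s in ones' loop, emitting segments forward
def pyB_go (ones zeros : List Int) (lastEnd n : Int) : List (Int × Int) :=
  match ones with
  | [] => []
  | s :: rest =>
    if s ≤ lastEnd then pyB_go rest zeros lastEnd n
    else
      let zs := pyB_advance zeros s
      let e := match zs with | [] => n | z :: _ => z
      (s, e) :: pyB_go rest zs e n

def extract_speech_segments_py_alt (decisions : List Int) : List (Int × Int) :=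
  pyB_go (pyB_ones decisions 0) (pyB_zeros decisions 0) (-1) (decisions.length : Int)

-- ===== PRECONDITION & SPEC =====
def Spec_extract_speech_segments_py (decisions : List Int) (out : List (Int × Int)) : Prop := out = extract_speech_segments_py_alt decisions
instance (decisions : List Int) (out : List (Int × Int)) : Decidable (Spec_extract_speech_segments_py decisions out) := by unfold Spec_extract_speech_segments_py; infer_instance

-- ===== CLAIM (what is proved, stated in full; the proofs are below) =====
def Claim_equal_extract_speech_segments_py : Prop := ∀ (decisions : List Int), Dom_extract_speech_segments_py decisions → Spec_extract_speech_segments_py decisions (extract_speech_segments_py decisions)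

-- ===== LEMMAS AND PROOFS =====

-- emitting-forward reformulation of A's loop together with its final flush
def loopA : List Int → Int → Option Int → List (Int × Int)
  | [], t, st => match st with | some s => [(s, t)] | none => []
  | d :: ds, t, none => if d = 1 then loopA ds (t + 1) (some t) else loopA ds (t + 1) none
  | d :: ds, t, some s => if d = 0 then (s, t) :: loopA ds (t + 1) none else loopA ds (t + 1) (some s)

theorem pyA_loop_acc (ds : List Int) : ∀ (segs : List (Int × Int)) (st : Option Int) (t : Int),
    pyA_loop ds segs st t = (segs ++ (pyA_loop ds [] st t).1, (pyA_loop ds [] st t).2) := by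
  induction ds with
  | nil => intro segs st t; simp [pyA_loop]
  | cons d ds ih =>
    intro segs st t
    cases st with
    | none =>
      rcases eq_or_ne d 1 with h | h
      · rw [show pyA_loop (d :: ds) segs none t = pyA_loop ds segs (some t) (t + 1) from by
            simp [pyA_loop, h],
          show pyA_loop (d :: ds) [] none t = pyA_loop ds [] (some t) (t + 1) from by
            simp [pyA_loop, h]]
        exact ih segs _ _
      · rw [show pyA_loop (d :: ds) segs none t = pyA_loop ds segs none (t + 1) from by
            simp [pyA_loop, h],
          show pyA_loop (d :: ds) [] none t = pyA_loop ds [] none (t + 1) from by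
            simp [pyA_loop, h]]
        exact ih segs _ _
    | some s =>
      rcases eq_or_ne d 0 with h | h
      · rw [show pyA_loop (d :: ds) segs (some s) t = pyA_loop ds (segs ++ [(s, t)]) none (t + 1) from by
            simp [pyA_loop, h],
          show pyA_loop (d :: ds) [] (some s) t = pyA_loop ds [(s, t)] none (t + 1) from by
            simp [pyA_loop, h]]
        rw [ih (segs ++ [(s, t)]), ih [(s, t)]]
        simp
      · rw [show pyA_loop (d :: ds) segs (some s) t = pyA_loop ds segs (some s) (t + 1) from by
            simp [pyA_loop, h],
          show pyA_loop (d :: ds) [] (some s) t = pyA_loop ds [] (some s) (t + 1) from by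
            simp [pyA_loop, h]]
        exact ih segs _ _

theorem extract_eq_loopA_aux (ds : List Int) : ∀ (st : Option Int) (t n : Int),
    n = t + (ds.length : Int) →
    loopA ds t st =
      (pyA_loop ds [] st t).1 ++
        (match (pyA_loop ds [] st t).2 with
          | some s => [(s, n)]
          | none => []) := by
  induction ds with
  | nil =>
    intro st t n hn
    subst hn; cases st <;> simp [loopA, pyA_loop]
  | cons d ds ih =>
    intro st t n hn
    have hn' : n = (t + 1) + (ds.length : Int) := by
      simp at hn; omega
    cases st with
    | none =>
      rcases eq_or_ne d 1 with h | h
      · rw [show pyA_loop (d :: ds) [] none t = pyA_loop ds [] (some t) (t + 1) from by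
            simp [pyA_loop, h],
          show loopA (d :: ds) t none = loopA ds (t + 1) (some t) from by simp [loopA, h]]
        exact ih (some t) (t + 1) n hn'
      · rw [show pyA_loop (d :: ds) [] none t = pyA_loop ds [] none (t + 1) from by
            simp [pyA_loop, h],
          show loopA (d :: ds) t none = loopA ds (t + 1) none from by simp [loopA, h]]
        exact ih none (t + 1) n hn'
    | some s =>
      rcases eq_or_ne d 0 with h | h
      · rw [show pyA_loop (d :: ds) [] (some s) t = pyA_loop ds [(s, t)] none (t + 1) from by
            simp [pyA_loop, h],
          show loopA (d :: ds) t (some s) = (s, t) :: loopA ds (t + 1) none from by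
            simp [loopA, h]]
        rw [pyA_loop_acc ds [(s, t)] none (t + 1)]
        rw [ih none (t + 1) n hn']
        simp
      · rw [show pyA_loop (d :: ds) [] (some s) t = pyA_loop ds [] (some s) (t + 1) from by
            simp [pyA_loop, h],
          show loopA (d :: ds) t (some s) = loopA ds (t + 1) (some s) from by simp [loopA, h]]
        exact ih (some s) (t + 1) n hn'

theorem extract_eq_loopA (ds : List Int) :
    extract_speech_segments_py ds = loopA ds 0 none := by
  rw [extract_eq_loopA_aux ds none 0 (ds.length : Int) (by omega)]
  unfold extract_speech_segments_py
  cases h : (pyA_loop ds [] none 0).2 <;> simp [h]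

theorem zeros_ge (ds : List Int) : ∀ (t z : Int), z ∈ pyB_zeros ds t → t ≤ z := by
  induction ds with
  | nil => intro t z h; simp [pyB_zeros] at h
  | cons d ds ih =>
    intro t z h
    by_cases hd : d = 0 <;> simp [pyB_zeros, hd] at h
    · rcases h with h | h
      · omega
      · have := ih (t + 1) z h; omega
    · have := ih (t + 1) z h; omega

theorem advance_split (zs : List Int) (s : Int) (h2 : ∀ z ∈ zs, s ≤ z) :
    ∀ zpre : List Int, (∀ z ∈ zpre, z < s) → pyB_advance (zpre ++ zs) s = zs := by
  intro zpre
  induction zpre with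
  | nil =>
    intro _
    cases zs with
    | nil => simp [pyB_advance]
    | cons z zs =>
      have := h2 z (by simp)
      simp [pyB_advance]
      omega
  | cons z zpre ih =>
    intro h1
    have hz := h1 z (by simp)
    simp only [List.cons_append, pyB_advance, if_pos hz]
    exact ih (fun w hw => h1 w (by simp [hw]))

-- evaluate the e-match in pyB_go
theorem match_headD (l : List Int) (n : Int) :
    (match l with | [] => n | z :: _ => z) = l.headD n := by
  cases l <;> rfl

-- the main invariant: (a) A's loop in state none  (b) A's loop in state some s
theorem main_inv (ds : List Int) : ∀ (t n : Int), n = t + (ds.length : Int) →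
    ((∀ (zpre : List Int) (lastEnd : Int), (∀ z ∈ zpre, z < t) → lastEnd < t →
        pyB_go (pyB_ones ds t) (zpre ++ pyB_zeros ds t) lastEnd n = loopA ds t none)
     ∧ (∀ s : Int,
        loopA ds t (some s)
          = (s, (pyB_zeros ds t).headD n)
            :: pyB_go (pyB_ones ds t) (pyB_zeros ds t) ((pyB_zeros ds t).headD n) n)) := by
  induction ds with
  | nil =>
    intro t n hn
    constructor
    · intro zpre lastEnd _ _
      simp [pyB_ones, pyB_zeros, pyB_go, loopA]
    · intro s
      simp at hn
      simp [pyB_ones, pyB_zeros, pyB_go, loopA, hn]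
  | cons d ds ih =>
    intro t n hn
    have hn' : n = (t + 1) + (ds.length : Int) := by
      simp at hn; omega
    have hzge : ∀ z ∈ pyB_zeros ds (t + 1), t + 1 ≤ z := fun z hzz => zeros_ge ds (t + 1) z hzz
    have hlen : (0 : Int) ≤ (ds.length : Int) := by positivity
    constructor
    · intro zpre lastEnd h1 h2
      rcases eq_or_ne d 1 with h | h
      · -- d = 1: B accepts start t, A enters state (some t)
        rw [show pyB_ones (d :: ds) t = t :: pyB_ones ds (t + 1) from by simp [pyB_ones, h],
          show pyB_zeros (d :: ds) t = pyB_zeros ds (t + 1) from by simp [pyB_zeros, h],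
          show loopA (d :: ds) t none = loopA ds (t + 1) (some t) from by simp [loopA, h]]
        rw [pyB_go, if_neg (by omega : ¬ (t ≤ lastEnd))]
        rw [advance_split (pyB_zeros ds (t + 1)) t (fun z hzz => by have := hzge z hzz; omega)
              zpre h1]
        simp only [match_headD]
        exact ((ih (t + 1) n hn').2 t).symm
      rcases eq_or_ne d 0 with h0 | h0
      · -- d = 0: a stale zero index t joins the pending prefix
        rw [show pyB_ones (d :: ds) t = pyB_ones ds (t + 1) from by simp [pyB_ones, h],
          show pyB_zeros (d :: ds) t = t :: pyB_zeros ds (t + 1) from by simp [pyB_zeros, h0],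
          show loopA (d :: ds) t none = loopA ds (t + 1) none from by simp [loopA, h],
          show zpre ++ t :: pyB_zeros ds (t + 1) = (zpre ++ [t]) ++ pyB_zeros ds (t + 1) from by
            simp]
        exact (ih (t + 1) n hn').1 (zpre ++ [t]) lastEnd
          (by intro z hzz; simp at hzz; rcases hzz with hzz | hzz <;> [exact lt_trans (h1 z hzz) (by omega); omega])
          (by omega)
      · -- other decision value: both sides skip it
        rw [show pyB_ones (d :: ds) t = pyB_ones ds (t + 1) from by simp [pyB_ones, h],
          show pyB_zeros (d :: ds) t = pyB_zeros ds (t + 1) from by simp [pyB_zeros, h0],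
          show loopA (d :: ds) t none = loopA ds (t + 1) none from by simp [loopA, h]]
        exact (ih (t + 1) n hn').1 zpre lastEnd
          (fun z hzz => lt_trans (h1 z hzz) (by omega)) (by omega)
    · intro s
      rcases eq_or_ne d 0 with h0 | h0
      · -- d = 0: A closes the segment at t; B's pending end is exactly t
        rw [show pyB_ones (d :: ds) t = pyB_ones ds (t + 1) from by simp [pyB_ones, h0],
          show pyB_zeros (d :: ds) t = t :: pyB_zeros ds (t + 1) from by simp [pyB_zeros, h0],
          show loopA (d :: ds) t (some s) = (s, t) :: loopA ds (t + 1) none from by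
            simp [loopA, h0]]
        simp only [List.headD_cons]
        rw [show t :: pyB_zeros ds (t + 1) = [t] ++ pyB_zeros ds (t + 1) from rfl]
        rw [(ih (t + 1) n hn').1 [t] t (by intro z hzz; simp at hzz; omega) (by omega)]
      rcases eq_or_ne d 1 with h | h
      · -- d = 1: B skips the extra start t (it lies before the pending end)
        rw [show pyB_ones (d :: ds) t = t :: pyB_ones ds (t + 1) from by simp [pyB_ones, h],
          show pyB_zeros (d :: ds) t = pyB_zeros ds (t + 1) from by simp [pyB_zeros, h0],
          show loopA (d :: ds) t (some s) = loopA ds (t + 1) (some s) from by simp [loopA, h0]]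
        have hle : t ≤ (pyB_zeros ds (t + 1)).headD n := by
          cases hc : pyB_zeros ds (t + 1) with
          | nil => simp; omega
          | cons z zs => have := hzge z (by simp [hc]); simp; omega
        rw [pyB_go, if_pos hle]
        exact (ih (t + 1) n hn').2 s
      · -- other decision value: both sides skip it
        rw [show pyB_ones (d :: ds) t = pyB_ones ds (t + 1) from by simp [pyB_ones, h],
          show pyB_zeros (d :: ds) t = pyB_zeros ds (t + 1) from by simp [pyB_zeros, h0],
          show loopA (d :: ds) t (some s) = loopA ds (t + 1) (some s) from by simp [loopA, h0]]
        exact (ih (t + 1) n hn').2 s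

-- ===== VERDICT (by name: the statement is the Claim_ definition above) =====
theorem extract_speech_segments_py_spec : Claim_equal_extract_speech_segments_py := by
  intro ds _
  unfold Spec_extract_speech_segments_py extract_speech_segments_py_alt
  rw [extract_eq_loopA]
  exact ((main_inv ds 0 (ds.length : Int) (by omega)).1 [] (-1) (by simp) (by norm_num)).symm
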